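-- pv_equiv track=rewrite | github.com/ShivangNagta/Oceanverse | mid.py | main_convert
-- ===== SOURCE A (Python) =====
-- def main_convert(pattern): #function taking the input of pattern(string)
--     L=[(1,1)]          #list with inital position
--     row=1              #initializing row
--     column=1           #initializing column
--     for i in pattern:  #taking all values of pattern
--         if i=='D':
--             L.append((row+1,column))  #appending a tuple of new coordinates
--             row=row+1                 #updating the row value
--         if i=='U':
--             L.append((row-1,column))  #appending a tuple of new coordinates
--             row=row-1                 #updating the row value
--         if i=='R':
--              L.append((row,column+1)) #appending a tuple of new coordinates
--              column=column+1          #updating the column value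
--         if i=='L':
--             L.append((row,column-1))  #appending a tuple of new coordinates
--             column-=1                 #updating the colmun value
--     return L                       #returning the list of tuples
-- ===== SOURCE B (Python) =====
-- def main_convert(pattern):
--     # Decompose the 2-D walk into two independent 1-D walks and zip them.
--     moves = [c for c in pattern if c in 'DURL']
--     r = 1
--     rows = [1]
--     for c in moves:
--         r += (c == 'D') - (c == 'U')
--         rows.append(r)
--     k = 1
--     cols = [1]
--     for c in moves:
--         k += (c == 'R') - (c == 'L')
--         cols.append(k)
--     return list(zip(rows, cols))
-- ===== Notes on version B (the rewrite author's own statement) =====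
-- stated objective: alternative
-- what changed: B decomposes the 2-D walk into two independent 1-D prefix-sum passes (a row track and a column track over the filtered move characters) and zips them into the path, instead of A's single loop mutating both coordinates and appending tuples with a four-way if-chain.
import Mathlib
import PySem

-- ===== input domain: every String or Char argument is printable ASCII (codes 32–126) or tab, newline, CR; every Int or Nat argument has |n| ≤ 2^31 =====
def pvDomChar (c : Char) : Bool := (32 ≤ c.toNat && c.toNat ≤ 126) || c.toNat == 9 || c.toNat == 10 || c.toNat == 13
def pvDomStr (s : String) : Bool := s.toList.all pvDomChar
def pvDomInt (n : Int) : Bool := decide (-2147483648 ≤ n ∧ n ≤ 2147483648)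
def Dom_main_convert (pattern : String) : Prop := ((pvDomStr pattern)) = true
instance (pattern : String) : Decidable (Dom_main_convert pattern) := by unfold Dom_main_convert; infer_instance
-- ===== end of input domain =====

-- B splits the walk into two independent 1-D prefix-sum tracks and zips them; alternative decomposition, same result.

-- ===== PORT A =====
-- state: (L, row, column); the four independent ifs of A, in order
def mcStepA (s : List (Int × Int) × Int × Int) (i : Char) : List (Int × Int) × Int × Int :=
  let s := if i = 'D' then (s.1 ++ [(s.2.1 + 1, s.2.2)], s.2.1 + 1, s.2.2) else s
  let s := if i = 'U' then (s.1 ++ [(s.2.1 - 1, s.2.2)], s.2.1 - 1, s.2.2) else s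
  let s := if i = 'R' then (s.1 ++ [(s.2.1, s.2.2 + 1)], s.2.1, s.2.2 + 1) else s
  let s := if i = 'L' then (s.1 ++ [(s.2.1, s.2.2 - 1)], s.2.1, s.2.2 - 1) else s
  s

def main_convert (pattern : String) : List (Int × Int) :=
  (pattern.toList.foldl mcStepA ([(1, 1)], 1, 1)).1

-- ===== PORT B =====
-- Source B's "c in 'DURL'" membership test
def mcIsMove (c : Char) : Bool := c = 'D' || c = 'U' || c = 'R' || c = 'L'
-- (c == 'D') - (c == 'U')
def mcDr (c : Char) : Int := (if c = 'D' then 1 else 0) - (if c = 'U' then 1 else 0)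
-- (c == 'R') - (c == 'L')
def mcDc (c : Char) : Int := (if c = 'R' then 1 else 0) - (if c = 'L' then 1 else 0)
-- one iteration of the row-track loop: state (r, rows)
def mcRowStep (s : Int × List Int) (c : Char) : Int × List Int :=
  let r := s.1 + mcDr c
  (r, s.2 ++ [r])
-- one iteration of the column-track loop: state (k, cols)
def mcColStep (s : Int × List Int) (c : Char) : Int × List Int :=
  let k := s.1 + mcDc c
  (k, s.2 ++ [k])

def main_convert_alt (pattern : String) : List (Int × Int) :=
  let moves := pattern.toList.filter mcIsMove
  let rows := (moves.foldl mcRowStep (1, [1])).2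
  let cols := (moves.foldl mcColStep (1, [1])).2
  rows.zip cols

-- ===== PRECONDITION & SPEC =====
def Spec_main_convert (pattern : String) (out : List (Int × Int)) : Prop := out = main_convert_alt pattern
instance (pattern : String) (out : List (Int × Int)) : Decidable (Spec_main_convert pattern out) := by unfold Spec_main_convert; infer_instance

-- ===== CLAIM (what is proved, stated in full; the proofs are below) =====
def Claim_equal_main_convert : Prop := ∀ (pattern : String), Dom_main_convert pattern → Spec_main_convert pattern (main_convert pattern)

-- ===== LEMMAS AND PROOFS =====

-- declarative path of the remaining moves, starting after (r,c)
def mcPath (r c : Int) : List Char → List (Int × Int)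
  | [] => []
  | m :: ms => (r + mcDr m, c + mcDc m) :: mcPath (r + mcDr m) (c + mcDc m) ms

def mcRows (r : Int) : List Char → List Int
  | [] => []
  | m :: ms => (r + mcDr m) :: mcRows (r + mcDr m) ms

def mcCols (c : Int) : List Char → List Int
  | [] => []
  | m :: ms => (c + mcDc m) :: mcCols (c + mcDc m) ms

theorem mc_zip_path (ms : List Char) : ∀ r c, (mcRows r ms).zip (mcCols c ms) = mcPath r c ms := by
  induction ms with
  | nil => intro r c; rfl
  | cons m ms ih => intro r c; simp [mcRows, mcCols, mcPath, ih]

theorem mc_foldA (cs : List Char) :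
    ∀ (L : List (Int × Int)) (r c : Int),
      (cs.foldl mcStepA (L, r, c)).1 = L ++ mcPath r c (cs.filter mcIsMove) := by
  induction cs with
  | nil => intro L r c; simp [mcPath]
  | cons i cs ih =>
    intro L r c
    by_cases hD : i = 'D'
    · subst hD
      rw [List.foldl_cons, show mcStepA (L, r, c) 'D' = (L ++ [(r + 1, c)], r + 1, c) from by
        simp [mcStepA], ih]
      simp [mcIsMove, mcPath, mcDr, mcDc]
    · by_cases hU : i = 'U'
      · subst hU
        rw [List.foldl_cons, show mcStepA (L, r, c) 'U' = (L ++ [(r - 1, c)], r - 1, c) from by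
          simp [mcStepA], ih]
        simp [mcIsMove, mcPath, mcDr, mcDc]
        ring_nf
        simp
      · by_cases hR : i = 'R'
        · subst hR
          rw [List.foldl_cons, show mcStepA (L, r, c) 'R' = (L ++ [(r, c + 1)], r, c + 1) from by
            simp [mcStepA], ih]
          simp [mcIsMove, mcPath, mcDr, mcDc]
        · by_cases hL : i = 'L'
          · subst hL
            rw [List.foldl_cons, show mcStepA (L, r, c) 'L' = (L ++ [(r, c - 1)], r, c - 1) from by
              simp [mcStepA], ih]
            simp [mcIsMove, mcPath, mcDr, mcDc]
            ring_nf
            simp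
          · rw [List.foldl_cons, show mcStepA (L, r, c) i = (L, r, c) from by
              simp [mcStepA, hD, hU, hR, hL], ih]
            simp [mcIsMove, hD, hU, hR, hL]

theorem mc_foldRows (ms : List Char) :
    ∀ (r : Int) (acc : List Int), (ms.foldl mcRowStep (r, acc)).2 = acc ++ mcRows r ms := by
  induction ms with
  | nil => intro r acc; simp [mcRows]
  | cons m ms ih => intro r acc; simp [mcRowStep, mcRows, ih]

theorem mc_foldCols (ms : List Char) :
    ∀ (c : Int) (acc : List Int), (ms.foldl mcColStep (c, acc)).2 = acc ++ mcCols c ms := by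
  induction ms with
  | nil => intro c acc; simp [mcCols]
  | cons m ms ih => intro c acc; simp [mcColStep, mcCols, ih]

-- ===== VERDICT (by name: the statement is the Claim_ definition above) =====
theorem main_convert_spec : Claim_equal_main_convert := by
  intro pattern _
  unfold Spec_main_convert main_convert main_convert_alt
  simp only []
  rw [mc_foldA, mc_foldRows, mc_foldCols]
  simp only [List.singleton_append, List.zip_cons_cons, mc_zip_path]
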